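-- pv_equiv track=rewrite | github.com/Tilak2404/Query-Graph-Structure | main.py | choose_label_columns
-- ===== SOURCE A (Python) =====
-- def choose_label_columns(columns: list[str], metric_columns: list[str]) -> list[str]:
--     label_priority_keywords = [
--         "description",
--         "name",
--         "label",
--         "product",
--         "customer",
--         "partner",
--         "salesorder",
--         "deliverydocument",
--         "billingdocument",
--         "accountingdocument",
--         "referencedocument",
--         "plant",
--         "companycode",
--         "salesorganization",
--     ]
--     label_columns = [column for column in columns if column not in metric_columns]
--
--     def column_rank(column: str) -> tuple[int, str]:
--         scan = column.lower().replace("_", "")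
--         for index, keyword in enumerate(label_priority_keywords):
--             if keyword in scan:
--                 return (index, scan)
--         return (len(label_priority_keywords), scan)
--
--     return sorted(label_columns, key=column_rank)
-- ===== SOURCE B (Python) =====
-- _LABEL_PRIORITY_KEYWORDS = [
--     "description",
--     "name",
--     "label",
--     "product",
--     "customer",
--     "partner",
--     "salesorder",
--     "deliverydocument",
--     "billingdocument",
--     "accountingdocument",
--     "referencedocument",
--     "plant",
--     "companycode",
--     "salesorganization",
-- ]
--
--
-- def _scan(column: str) -> str:
--     return column.lower().replace("_", "")
--
--
-- def _rank(scan: str) -> int: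
--     for index, keyword in enumerate(_LABEL_PRIORITY_KEYWORDS):
--         if keyword in scan:
--             return index
--     return len(_LABEL_PRIORITY_KEYWORDS)
--
--
-- def choose_label_columns(columns: list[str], metric_columns: list[str]) -> list[str]:
--     buckets = [[] for _ in range(len(_LABEL_PRIORITY_KEYWORDS) + 1)]
--     for column in columns:
--         if column not in metric_columns:
--             buckets[_rank(_scan(column))].append(column)
--     out = []
--     for bucket in buckets:
--         out.extend(sorted(bucket, key=_scan))
--     return out
-- ===== Notes on version B (the rewrite author's own statement) =====
-- stated objective: alternative
-- what changed: Replaces the single stable key-sort by the composite (keyword-rank, scan) key with a one-pass rank-bucketing of the filtered columns followed by a stable per-bucket sort on the scan string alone, concatenating buckets in rank order.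
import Mathlib
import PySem

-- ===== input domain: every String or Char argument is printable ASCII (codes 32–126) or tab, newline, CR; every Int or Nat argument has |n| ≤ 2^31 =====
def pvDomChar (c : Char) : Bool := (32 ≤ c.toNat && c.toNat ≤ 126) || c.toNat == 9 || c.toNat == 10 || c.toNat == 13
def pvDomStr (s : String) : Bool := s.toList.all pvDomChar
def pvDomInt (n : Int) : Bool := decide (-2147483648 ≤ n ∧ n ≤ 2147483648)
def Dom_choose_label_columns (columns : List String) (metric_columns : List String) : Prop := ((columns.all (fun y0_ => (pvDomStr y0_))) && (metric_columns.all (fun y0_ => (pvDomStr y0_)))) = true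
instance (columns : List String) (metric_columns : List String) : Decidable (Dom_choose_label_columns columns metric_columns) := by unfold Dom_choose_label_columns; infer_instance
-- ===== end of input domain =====

-- B replaces the single key-sort by (rank, scan) with one bucket per keyword rank filled in one
-- pass and a stable per-bucket sort by scan only (objective: alternative decomposition, same cost).

-- ===== PORT A =====
-- shared helpers: both Python files compute scan = column.lower().replace("_","") and the
-- first-matching-keyword index by the same enumerate loop (A inside column_rank, B as _scan/_rank)
def pvLabelPriorityKeywords : List String :=
  ["description", "name", "label", "product", "customer", "partner", "salesorder",
   "deliverydocument", "billingdocument", "accountingdocument", "referencedocument",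
   "plant", "companycode", "salesorganization"]

def pvScan (column : String) : String :=
  PySem.Str.replace (PySem.Str.lower column) "_" ""

-- 'for index, keyword in enumerate(keywords): if keyword in scan: return index / break'
-- (index carried as the enumerate counter; falling off the list leaves index = len(keywords))
def pvRankGo (scan : String) (index : Nat) : List String → Nat
  | [] => index
  | keyword :: rest =>
      if PySem.Str.isIn keyword scan then index else pvRankGo scan (index + 1) rest

def pvRank (scan : String) : Nat := pvRankGo scan 0 pvLabelPriorityKeywords

def column_rank (column : String) : Nat × String :=
  let scan := pvScan column
  (pvRank scan, scan)

def choose_label_columns (columns : List String) (metric_columns : List String) : List String :=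
  let label_columns := columns.filter (fun column => !metric_columns.contains column)
  PySem.List.sorted2 label_columns (fun c => (column_rank c).1) (fun c => (column_rank c).2)

-- ===== PORT B =====
def choose_label_columns_alt (columns : List String) (metric_columns : List String) : List String :=
  let init : List (List String) := (List.range (pvLabelPriorityKeywords.length + 1)).map (fun _ => [])
  let buckets := columns.foldl (fun bs column =>
    if !metric_columns.contains column then
      let r := pvRank (pvScan column)   -- r < len(keywords)+1, so plain list indexing is exact
      bs.set r ((bs.getD r []) ++ [column])
    else bs) init
  (buckets.map (fun bucket => PySem.List.sorted bucket pvScan)).flatten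

-- ===== PRECONDITION & SPEC =====
def Spec_choose_label_columns (columns : List String) (metric_columns : List String) (out : List String) : Prop := out = choose_label_columns_alt columns metric_columns
instance (columns : List String) (metric_columns : List String) (out : List String) : Decidable (Spec_choose_label_columns columns metric_columns out) := by unfold Spec_choose_label_columns; infer_instance

-- ===== CLAIM (what is proved, stated in full; the proofs are below) =====
def Claim_equal_choose_label_columns : Prop := ∀ (columns : List String) (metric_columns : List String), Dom_choose_label_columns columns metric_columns → Spec_choose_label_columns columns metric_columns (choose_label_columns columns metric_columns)

-- ===== LEMMAS AND PROOFS =====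

-- A's sorted2 comparison, specialised to column_rank's components
def pvRk (c : String) : Nat := pvRank (pvScan c)

def pvB2 (a b : String) : Bool :=
  decide ((column_rank a).1 < (column_rank b).1) ||
    (!decide ((column_rank b).1 < (column_rank a).1) && decide ((column_rank a).2 < (column_rank b).2))

lemma pvB2_true_of_rk_lt (a b : String) (h : pvRk a < pvRk b) : pvB2 a b = true := by
  simp only [pvRk] at h
  simp [pvB2, column_rank, h]

lemma pvB2_false_of_rk_gt (a b : String) (h : pvRk b < pvRk a) : pvB2 a b = false := by
  simp only [pvRk] at h
  simp [pvB2, column_rank, h, Nat.lt_asymm h]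

lemma pvB2_eq_scan_of_rk_eq (a b : String) (h : pvRk a = pvRk b) : pvB2 a b = decide (pvScan a < pvScan b) := by
  simp only [pvRk] at h
  by_cases hs : pvScan a < pvScan b
  · simp [pvB2, column_rank, h, hs]
  · simp [pvB2, column_rank, h, hs]

lemma pvRankGo_le (scan : String) (l : List String) : ∀ i, pvRankGo scan i l ≤ i + l.length := by
  induction l with
  | nil => intro i; simp [pvRankGo]
  | cons k rest ih =>
      intro i
      simp only [pvRankGo]
      split
      · omega
      · have h := ih (i + 1)
        simp only [List.length_cons]
        omega

lemma pvRk_lt (c : String) : pvRk c < pvLabelPriorityKeywords.length + 1 := by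
  have := pvRankGo_le (pvScan c) pvLabelPriorityKeywords 0
  simpa [pvRk, pvRank] using Nat.lt_succ_of_le (by simpa using this)

lemma insertBy_congr (p q : String → String → Bool) (x : String) (l : List String)
    (h : ∀ y ∈ l, p x y = q x y) :
    PySem.List.insertBy p x l = PySem.List.insertBy q x l := by
  induction l with
  | nil => rfl
  | cons b t ih =>
      have hb := h b (by simp)
      simp only [PySem.List.insertBy, hb]
      split
      · rfl
      · rw [ih (fun y hy => h y (by simp [hy]))]

lemma insertBy_append_left (p : String → String → Bool) (x : String) (A C : List String)
    (h : ∀ y ∈ A, p x y = false) :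
    PySem.List.insertBy p x (A ++ C) = A ++ PySem.List.insertBy p x C := by
  induction A with
  | nil => rfl
  | cons a t ih =>
      have ha := h a (by simp)
      simp only [List.cons_append, PySem.List.insertBy, ha]
      simp [ih (fun y hy => h y (by simp [hy]))]

lemma insertBy_append_right (p : String → String → Bool) (x : String) (B C : List String)
    (h : ∀ y ∈ C, p x y = true) :
    PySem.List.insertBy p x (B ++ C) = PySem.List.insertBy p x B ++ C := by
  induction B with
  | nil =>
      cases C with
      | nil => rfl
      | cons c t => simp [PySem.List.insertBy, h c (by simp)]
  | cons b t ih =>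
      simp only [List.cons_append, PySem.List.insertBy]
      split
      · rfl
      · simp [ih]

lemma sorted_snoc (b : List String) (x : String) :
    PySem.List.sorted (b ++ [x]) pvScan =
      PySem.List.insertBy (fun a c => decide (pvScan a < pvScan c)) x (PySem.List.sorted b pvScan) := by
  rw [PySem.List.sorted_eq_foldl_insertBy, PySem.List.sorted_eq_foldl_insertBy, List.foldl_append]
  rfl

-- insert x into the concatenation of per-rank sorted buckets = append x to its bucket, sorted
lemma ins_flatten (x : String) : ∀ (bs : List (List String)) (j : Nat),
    (∀ i (h : i < bs.length), ∀ y ∈ bs[i], pvRk y = j + i) →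
    j ≤ pvRk x → pvRk x < j + bs.length →
    PySem.List.insertBy pvB2 x ((bs.map (fun b => PySem.List.sorted b pvScan)).flatten)
      = ((bs.set (pvRk x - j) ((bs.getD (pvRk x - j) []) ++ [x])).map
          (fun b => PySem.List.sorted b pvScan)).flatten := by
  intro bs
  induction bs with
  | nil => intro j _ h1 h2; simp only [List.length_nil] at h2; omega
  | cons b rest ih =>
      intro j hmem hle hlt
      rcases Nat.eq_or_lt_of_le hle with heq | hgt
      · -- x belongs to the first bucket
        have hz : pvRk x - j = 0 := by omega
        simp only [hz, List.set_cons_zero, List.getD_cons_zero, List.map_cons, List.flatten_cons]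
        have hC : ∀ y ∈ ((rest.map (fun b => PySem.List.sorted b pvScan)).flatten), pvB2 x y = true := by
          intro y hy
          obtain ⟨l, hl, hyl⟩ := List.mem_flatten.1 hy
          obtain ⟨b', hb', rfl⟩ := List.mem_map.1 hl
          obtain ⟨i, hi, rfl⟩ := List.mem_iff_getElem.1 hb'
          have hy' : y ∈ rest[i] := (PySem.List.mem_sorted _ _ _ _).1 hyl
          have := hmem (i + 1) (by simpa using Nat.succ_lt_succ hi) y (by simpa using hy')
          have hx : pvRk x < pvRk y := by omega
          exact pvB2_true_of_rk_lt x y hx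
        rw [insertBy_append_right _ _ _ _ hC]
        have hB : ∀ y ∈ PySem.List.sorted b pvScan, pvB2 x y = (fun a c => decide (pvScan a < pvScan c)) x y := by
          intro y hy
          have hy' : y ∈ b := (PySem.List.mem_sorted _ _ _ _).1 hy
          have := hmem 0 (by simp) y (by simpa using hy')
          have hr : pvRk x = pvRk y := by omega
          exact pvB2_eq_scan_of_rk_eq x y hr
        rw [insertBy_congr pvB2 (fun a c => decide (pvScan a < pvScan c)) x _ hB, ← sorted_snoc]
      · -- x belongs to a later bucket
        have hk : pvRk x - j = (pvRk x - (j + 1)) + 1 := by omega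
        simp only [hk, List.set_cons_succ, List.getD_cons_succ, List.map_cons, List.flatten_cons]
        have hA : ∀ y ∈ PySem.List.sorted b pvScan, pvB2 x y = false := by
          intro y hy
          have hy' : y ∈ b := (PySem.List.mem_sorted _ _ _ _).1 hy
          have := hmem 0 (by simp) y (by simpa using hy')
          have hr : pvRk y < pvRk x := by omega
          exact pvB2_false_of_rk_gt x y hr
        rw [insertBy_append_left _ _ _ _ hA]
        rw [ih (j + 1) (fun i hi y hy => by
              have := hmem (i + 1) (by simpa using Nat.succ_lt_succ hi) y (by simpa using hy)
              omega)
            (by omega) (by simp only [List.length_cons] at hlt; omega)]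

def pvInv (bs : List (List String)) : Prop :=
  ∀ i (h : i < bs.length), ∀ y ∈ bs[i], pvRk y = i

lemma inv_set (bs : List (List String)) (x : String) (hinv : pvInv bs)
    (hlt : pvRk x < bs.length) :
    pvInv (bs.set (pvRk x) ((bs.getD (pvRk x) []) ++ [x])) := by
  intro i hi y hy
  rw [List.length_set] at hi
  rw [List.getElem_set] at hy
  by_cases h : pvRk x = i
  · subst h
    rw [if_pos rfl] at hy
    rcases List.mem_append.1 hy with h1 | h1
    · exact hinv _ hlt y (by rwa [List.getD_eq_getElem _ _ hlt] at h1)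
    · simp at h1; subst h1; rfl
  · rw [if_neg h] at hy
    exact hinv i hi y hy

lemma fold_eq (ls : List String) : ∀ (bs : List (List String)),
    bs.length = pvLabelPriorityKeywords.length + 1 → pvInv bs →
    (((ls.foldl (fun bs column =>
        bs.set (pvRank (pvScan column)) ((bs.getD (pvRank (pvScan column)) []) ++ [column])) bs).map
          (fun b => PySem.List.sorted b pvScan)).flatten)
      = ls.foldl (fun acc x => PySem.List.insertBy pvB2 x acc)
          ((bs.map (fun b => PySem.List.sorted b pvScan)).flatten) := by
  induction ls with
  | nil => intro bs _ _; rfl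
  | cons x t ih =>
      intro bs hlen hinv
      rw [List.foldl_cons, List.foldl_cons]
      have hlt : pvRk x < bs.length := by rw [hlen]; exact pvRk_lt x
      have hset := inv_set bs x hinv hlt
      rw [ih _ (by simpa [List.length_set] using hlen) (by simpa [pvRk] using hset)]
      congr 1
      have := ins_flatten x bs 0 (fun i hi y hy => by simpa using hinv i hi y hy)
        (Nat.zero_le _) (by simpa using hlt)
      simpa [pvRk] using this.symm

lemma foldl_guard_eq_foldl_filter (cols : List String) (mc : List String)
    (f : List (List String) → String → List (List String)) : ∀ (bs : List (List String)),
    cols.foldl (fun bs column => if !mc.contains column then f bs column else bs) bs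
      = (cols.filter (fun column => !mc.contains column)).foldl f bs := by
  induction cols with
  | nil => intro bs; rfl
  | cons c t ih =>
      intro bs
      rw [List.foldl_cons, List.filter_cons]
      cases hc : mc.contains c with
      | false =>
          rw [if_pos (by rfl), if_pos (by rfl), List.foldl_cons]
          exact ih _
      | true =>
          rw [if_neg (by simp), if_neg (by simp)]
          exact ih _

lemma comp_eq : (fun a b => decide ((column_rank a).1 < (column_rank b).1) ||
    (!decide ((column_rank b).1 < (column_rank a).1) && decide ((column_rank a).2 < (column_rank b).2))) = pvB2 := by
  funext a b
  rfl

lemma sorted2_foldl_raw (ls : List String) :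
    PySem.List.sorted2 ls (fun c => (column_rank c).1) (fun c => (column_rank c).2)
      = ls.foldl (fun acc x => PySem.List.insertBy (fun a b => decide ((column_rank a).1 < (column_rank b).1) ||
          (!decide ((column_rank b).1 < (column_rank a).1) && decide ((column_rank a).2 < (column_rank b).2))) x acc) [] := rfl

lemma sorted2_foldl (ls : List String) :
    PySem.List.sorted2 ls (fun c => (column_rank c).1) (fun c => (column_rank c).2)
      = ls.foldl (fun acc x => PySem.List.insertBy pvB2 x acc) [] := by
  rw [sorted2_foldl_raw, comp_eq]

-- ===== VERDICT (by name: the statement is the Claim_ definition above) =====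
theorem choose_label_columns_spec : Claim_equal_choose_label_columns := by
  intro columns metric_columns _
  unfold Spec_choose_label_columns
  show PySem.List.sorted2 (columns.filter (fun column => !metric_columns.contains column))
        (fun c => (column_rank c).1) (fun c => (column_rank c).2)
      = (((columns.foldl (fun bs column =>
            if !metric_columns.contains column then
              bs.set (pvRank (pvScan column)) ((bs.getD (pvRank (pvScan column)) []) ++ [column])
            else bs)
          ((List.range (pvLabelPriorityKeywords.length + 1)).map (fun _ => []))).map
            (fun bucket => PySem.List.sorted bucket pvScan)).flatten)
  rw [foldl_guard_eq_foldl_filter]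
  rw [fold_eq _ _ (by simp) (by intro i hi y hy; simp at hy)]
  have h1 : ((((List.range (pvLabelPriorityKeywords.length + 1)).map
      (fun _ => ([] : List String))).map (fun b => PySem.List.sorted b pvScan)).flatten) = [] := by
    rfl
  rw [h1]
  exact sorted2_foldl _
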